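-- pv_equiv track=rewrite | github.com/gheyret/uyghur-asr-ctc | data.py | cer_wer
-- ===== SOURCE A (Python) =====
-- def levenshtein(a,b):
--     "Calculates the Levenshtein distance between a and b."
--     n, m = len(a), len(b)
--     if n > m:
--         # Make sure n <= m, to use O(min(n,m)) space
--         a,b = b,a
--         n,m = m,n
--
--     current = list(range(n+1))
--     for i in range(1,m+1):
--         previous, current = current, [i]+[0]*n
--         for j in range(1,n+1):
--             add, delete = previous[j]+1, current[j-1]+1
--             change = previous[j-1]
--             if a[j-1] != b[i-1]:
--                 change = change + 1
--             current[j] = min(add, delete, change)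
--
--     return current[n]
--
-- def wer(s1, src):
--     sw = src.split()
--     return levenshtein(s1.split(),sw), len(sw)
--
-- def cer(s1, src):
--     return levenshtein(s1,src),len(src)
--
-- def cer_wer(preds, targets):
--     err_c, lettercnt, err_w, wordcnt = 0,0,0,0
--     for pred, target in zip(preds, targets):
--         c_er, c_cnt = cer(pred, target)
--         w_er, w_cnt = wer(pred, target)
--         err_c     += c_er
--         lettercnt += c_cnt
--         wordcnt   += w_cnt
--         err_w     += w_er
--
--     return err_c, lettercnt, err_w, wordcnt
-- ===== SOURCE B (Python) =====
-- def levenshtein(a, b):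
--     "Levenshtein distance, computed top-down over index pairs with a memo dict."
--     memo = {}
--
--     def edit(i, j):
--         key = (i, j)
--         if key in memo:
--             return memo[key]
--         if i == 0:
--             d = j
--         elif j == 0:
--             d = i
--         else:
--             cost = 0 if a[i - 1] == b[j - 1] else 1
--             d = min(edit(i - 1, j) + 1, edit(i, j - 1) + 1, edit(i - 1, j - 1) + cost)
--         memo[key] = d
--         return d
--
--     return edit(len(a), len(b))
--
--
-- def cer_wer(preds, targets):
--     pairs = list(zip(preds, targets))
--     err_c = sum(levenshtein(p, t) for p, t in pairs)
--     lettercnt = sum(len(t) for p, t in pairs)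
--     err_w = sum(levenshtein(p.split(), t.split()) for p, t in pairs)
--     wordcnt = sum(len(t.split()) for p, t in pairs)
--     return err_c, lettercnt, err_w, wordcnt
-- ===== Notes on version B (the rewrite author's own statement) =====
-- stated objective: alternative
-- what changed: levenshtein is re-done as top-down memoized recursion on index pairs (dict memo, no row arrays, no n<=m swap), and cer_wer aggregates by four independent sums over the zipped pairs instead of one running 4-tuple accumulator with cer/wer helpers.
import Mathlib
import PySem

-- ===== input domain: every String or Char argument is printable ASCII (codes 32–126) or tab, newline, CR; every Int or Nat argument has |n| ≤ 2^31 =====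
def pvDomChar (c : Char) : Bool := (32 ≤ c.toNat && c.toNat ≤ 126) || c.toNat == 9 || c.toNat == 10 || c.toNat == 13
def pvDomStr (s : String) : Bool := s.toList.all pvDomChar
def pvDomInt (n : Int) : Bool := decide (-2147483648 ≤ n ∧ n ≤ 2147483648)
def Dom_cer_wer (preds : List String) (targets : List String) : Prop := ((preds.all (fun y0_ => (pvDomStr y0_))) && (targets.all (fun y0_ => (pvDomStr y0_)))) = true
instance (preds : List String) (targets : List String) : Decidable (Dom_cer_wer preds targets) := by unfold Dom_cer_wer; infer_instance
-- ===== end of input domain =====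

-- B replaces A's two-row bottom-up DP (with the n<=m swap) by top-down memoized
-- recursion on index pairs, and sums the four totals in independent passes; an
-- alternative of similar cost, not claimed faster.

-- ===== PORT A =====
-- inner loop 'for j in range(1,n+1)': walks the rest of a and of the previous row,
-- carrying previous[j-1] (diag) and the just-written current[j-1] (left)
def pvLevInnerA {α : Type} [DecidableEq α] (y : α) : List α → List Int → Int → Int → List Int
  | [], _, _, _ => []
  | _ :: _, [], _, _ => []
  | x :: as, p :: ps, diag, left =>
    let add := p + 1
    let del := left + 1
    let change := if x ≠ y then diag + 1 else diag
    let v := min (min add del) change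
    v :: pvLevInnerA y as ps p v

-- outer loop 'for i in range(1,m+1)': y = b[i-1], current := [i]+…, then the inner loop
def pvLevRowsA {α : Type} [DecidableEq α] (a : List α) : List α → Int → List Int → List Int
  | [], _, current => current
  | y :: bs, i, current =>
    let current' := match current with
      | [] => [i]
      | p0 :: ptail => i :: pvLevInnerA y a ptail p0 i
    pvLevRowsA a bs (i + 1) current'

def pvLevenshteinA {α : Type} [DecidableEq α] (a b : List α) : Int :=
  let n := a.length
  let m := b.length
  if n > m then
    -- a,b = b,a ; n,m = m,n
    (pvLevRowsA b a 1 ((List.range (m + 1)).map Int.ofNat)).getD m 0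
  else
    (pvLevRowsA a b 1 ((List.range (n + 1)).map Int.ofNat)).getD n 0

def pvCerA (s1 src : String) : Int × Int :=
  (pvLevenshteinA s1.toList src.toList, PySem.Str.len src)

def pvWerA (s1 src : String) : Int × Int :=
  let sw := PySem.Str.split₀ src
  (pvLevenshteinA (PySem.Str.split₀ s1) sw, (sw.length : Int))

def cer_wer (preds : List String) (targets : List String) : Int × Int × Int × Int :=
  (preds.zip targets).foldl
    (fun acc pt =>
      let cw := pvCerA pt.1 pt.2
      let ww := pvWerA pt.1 pt.2
      (acc.1 + cw.1, acc.2.1 + cw.2, acc.2.2.1 + ww.1, acc.2.2.2 + ww.2))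
    (0, 0, 0, 0)

-- ===== PORT B =====
-- edit(i, j) with the memo dict threaded through (Python mutates `memo` in place)
def pvEditB {α : Type} [DecidableEq α] (a b : List α) :
    Nat → Nat → PySem.Dict (Int × Int) Int → Int × PySem.Dict (Int × Int) Int
  | i, j, memo =>
    match memo.get? ((i : Int), (j : Int)) with
    | some v => (v, memo)
    | none =>
      match i, j with
      | 0, j => ((j : Int), memo.insert ((0 : Int), (j : Int)) (j : Int))
      | i + 1, 0 =>
        (((i + 1 : Nat) : Int), memo.insert (((i + 1 : Nat) : Int), (0 : Int)) ((i + 1 : Nat) : Int))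
      | i + 1, j + 1 =>
        let cost : Int := if a[i]? = b[j]? then 0 else 1
        let r1 := pvEditB a b i (j + 1) memo
        let r2 := pvEditB a b (i + 1) j r1.2
        let r3 := pvEditB a b i j r2.2
        let d := min (min (r1.1 + 1) (r2.1 + 1)) (r3.1 + cost)
        (d, r3.2.insert (((i + 1 : Nat) : Int), ((j + 1 : Nat) : Int)) d)
  termination_by i j _ => i + j
  decreasing_by all_goals omega

def pvLevenshteinB {α : Type} [DecidableEq α] (a b : List α) : Int :=
  (pvEditB a b a.length b.length PySem.Dict.empty).1

def cer_wer_alt (preds : List String) (targets : List String) : Int × Int × Int × Int :=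
  let pairs := preds.zip targets
  ((pairs.map (fun pt => pvLevenshteinB pt.1.toList pt.2.toList)).sum,
   (pairs.map (fun pt => PySem.Str.len pt.2)).sum,
   (pairs.map (fun pt => pvLevenshteinB (PySem.Str.split₀ pt.1) (PySem.Str.split₀ pt.2))).sum,
   (pairs.map (fun pt => ((PySem.Str.split₀ pt.2).length : Int))).sum)

-- ===== PRECONDITION & SPEC =====
def Spec_cer_wer (preds : List String) (targets : List String) (out : Int × Int × Int × Int) : Prop := out = cer_wer_alt preds targets
instance (preds : List String) (targets : List String) (out : Int × Int × Int × Int) : Decidable (Spec_cer_wer preds targets out) := by unfold Spec_cer_wer; infer_instance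

-- ===== CLAIM (what is proved, stated in full; the proofs are below) =====
def Claim_equal_cer_wer : Prop := ∀ (preds : List String) (targets : List String), Dom_cer_wer preds targets → Spec_cer_wer preds targets (cer_wer preds targets)

-- ===== LEMMAS AND PROOFS =====

-- the common specification: edit distance of the length-i prefix of a and the length-j prefix of b
def pvED {α : Type} [DecidableEq α] (a b : List α) : Nat → Nat → Int
  | 0, j => (j : Int)
  | i + 1, 0 => ((i + 1 : Nat) : Int)
  | i + 1, j + 1 =>
    min (min (pvED a b i (j + 1) + 1) (pvED a b (i + 1) j + 1))
        (pvED a b i j + if a[i]? = b[j]? then 0 else 1)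
  termination_by i j => i + j
  decreasing_by all_goals omega

lemma pvED_zero_right {α : Type} [DecidableEq α] (a b : List α) (i : Nat) :
    pvED a b i 0 = (i : Int) := by
  cases i <;> simp [pvED]

lemma pvED_zero_left {α : Type} [DecidableEq α] (a b : List α) (j : Nat) :
    pvED a b 0 j = (j : Int) := by
  simp [pvED]

lemma pvED_succ_succ {α : Type} [DecidableEq α] (a b : List α) (i j : Nat) :
    pvED a b (i + 1) (j + 1)
      = min (min (pvED a b i (j + 1) + 1) (pvED a b (i + 1) j + 1))
          (pvED a b i j + if a[i]? = b[j]? then 0 else 1) := by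
  rw [pvED]

lemma pvED_symm_aux {α : Type} [DecidableEq α] (a b : List α) :
    ∀ (s i j : Nat), i + j ≤ s → pvED a b i j = pvED b a j i := by
  intro s
  induction s with
  | zero =>
    intro i j h
    obtain ⟨rfl, rfl⟩ : i = 0 ∧ j = 0 := by omega
    simp [pvED]
  | succ s ih =>
    intro i j h
    match i, j with
    | 0, j => rw [pvED_zero_left, pvED_zero_right]
    | i + 1, 0 => rw [pvED_zero_left, pvED_zero_right]
    | i + 1, j + 1 =>
      rw [pvED_succ_succ, pvED_succ_succ,
        ih i (j + 1) (by omega), ih (i + 1) j (by omega), ih i j (by omega)]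
      have hcond : (b[j]? = a[i]?) ↔ (a[i]? = b[j]?) := eq_comm
      by_cases hc : a[i]? = b[j]?
      · simp only [if_pos hc, if_pos (hcond.mpr hc)]; omega
      · simp only [if_neg hc, if_neg (fun h => hc (hcond.mp h))]; omega

lemma pvED_symm {α : Type} [DecidableEq α] (a b : List α) (i j : Nat) :
    pvED a b i j = pvED b a j i :=
  pvED_symm_aux a b (i + j) i j le_rfl

-- ---- B side ----
def pvMemoInv {α : Type} [DecidableEq α] (a b : List α) (memo : PySem.Dict (Int × Int) Int) : Prop :=
  ∀ (i j : Nat) (v : Int), memo.get? ((i : Int), (j : Int)) = some v → v = pvED a b i j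

lemma pvKey_inj (i j i' j' : Nat)
    (h : ((i' : Int), (j' : Int)) = ((i : Int), (j : Int))) : i' = i ∧ j' = j := by
  simp only [Prod.ext_iff, Nat.cast_inj] at h
  exact h

lemma pvMemoInv_insert {α : Type} [DecidableEq α] (a b : List α)
    (memo : PySem.Dict (Int × Int) Int) (hinv : pvMemoInv a b memo) (i j : Nat) :
    pvMemoInv a b (memo.insert ((i : Int), (j : Int)) (pvED a b i j)) := by
  intro i' j' v hv
  rw [PySem.Dict.get?_insert] at hv
  by_cases hk : ((i' : Int), (j' : Int)) = ((i : Int), (j : Int))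
  · rw [if_pos hk] at hv
    obtain ⟨rfl, rfl⟩ := pvKey_inj i j i' j' hk
    cases hv
    rfl
  · rw [if_neg hk] at hv
    exact hinv i' j' v hv

lemma pvEditB_spec {α : Type} [DecidableEq α] (a b : List α) :
    ∀ (s i j : Nat) (memo : PySem.Dict (Int × Int) Int), i + j ≤ s → pvMemoInv a b memo →
      (pvEditB a b i j memo).1 = pvED a b i j ∧ pvMemoInv a b (pvEditB a b i j memo).2 := by
  intro s
  induction s with
  | zero =>
    intro i j memo h hinv
    obtain ⟨rfl, rfl⟩ : i = 0 ∧ j = 0 := by omega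
    rw [pvEditB.eq_def]; dsimp only
    cases hm : memo.get? (((0 : Nat) : Int), ((0 : Nat) : Int)) with
    | some v =>
      exact ⟨hinv 0 0 v hm, hinv⟩
    | none =>
      constructor
      · simp [pvED]
      · have := pvMemoInv_insert a b memo hinv 0 0
        simpa [pvED_zero_left] using this
  | succ s ih =>
    intro i j memo h hinv
    rw [pvEditB.eq_def]; dsimp only
    cases hm : memo.get? ((i : Int), (j : Int)) with
    | some v =>
      exact ⟨hinv i j v hm, hinv⟩
    | none =>
      match i, j with
      | 0, j =>
        constructor
        · simp [pvED_zero_left]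
        · have := pvMemoInv_insert a b memo hinv 0 j
          simpa [pvED_zero_left] using this
      | i + 1, 0 =>
        constructor
        · simp [pvED_zero_right]
        · have := pvMemoInv_insert a b memo hinv (i + 1) 0
          simpa [pvED_zero_right] using this
      | i + 1, j + 1 =>
        have h1 := ih i (j + 1) memo (by omega) hinv
        have h2 := ih (i + 1) j (pvEditB a b i (j + 1) memo).2 (by omega) h1.2
        have h3 := ih i j (pvEditB a b (i + 1) j (pvEditB a b i (j + 1) memo).2).2
          (by omega) h2.2
        have hd : min (min ((pvEditB a b i (j + 1) memo).1 + 1)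
              ((pvEditB a b (i + 1) j (pvEditB a b i (j + 1) memo).2).1 + 1))
            ((pvEditB a b i j
                (pvEditB a b (i + 1) j (pvEditB a b i (j + 1) memo).2).2).1
              + if a[i]? = b[j]? then 0 else 1)
            = pvED a b (i + 1) (j + 1) := by
          rw [h1.1, h2.1, h3.1, pvED_succ_succ]
        constructor
        · simpa using hd
        · simp only []
          rw [hd]
          exact pvMemoInv_insert a b _ h3.2 (i + 1) (j + 1)

lemma pvLevenshteinB_eq {α : Type} [DecidableEq α] (a b : List α) :
    pvLevenshteinB a b = pvED a b a.length b.length := by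
  have h := pvEditB_spec a b (a.length + b.length) a.length b.length PySem.Dict.empty le_rfl
    (by intro i j v hv; simp [PySem.Dict.get?_empty] at hv)
  exact h.1

-- ---- A side ----
def pvRowSeg {α : Type} [DecidableEq α] (a b : List α) (i start len : Nat) : List Int :=
  (List.range' start len).map (fun j => pvED a b j i)

def pvRowFull {α : Type} [DecidableEq α] (a b : List α) (i : Nat) : List Int :=
  (List.range (a.length + 1)).map (fun j => pvED a b j i)

lemma pvInnerA_spec {α : Type} [DecidableEq α] (a b : List α) (y : α) (i : Nat)
    (hy : b[i]? = some y) :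
    ∀ (as : List α) (k : Nat), a.drop k = as →
      pvLevInnerA y as (pvRowSeg a b i (k + 1) (a.length - k)) (pvED a b k i) (pvED a b k (i + 1))
        = pvRowSeg a b (i + 1) (k + 1) (a.length - k) := by
  intro as
  induction as with
  | nil =>
    intro k hk
    have hlen : a.length - k = 0 := by
      have := List.drop_eq_nil_iff.mp hk
      omega
    simp [pvRowSeg, hlen, pvLevInnerA]
  | cons x as ihx =>
    intro k hk
    have hak : a[k]? = some x := by
      have h0 : (a.drop k)[0]? = some x := by rw [hk]; rfl
      simpa [List.getElem?_drop] using h0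
    have hdrop : a.drop (k + 1) = as := by
      have h1 := congrArg (List.drop 1) hk
      rw [List.drop_drop] at h1
      simpa using h1
    have hlen : a.length - k = as.length + 1 := by
      have h2 := congrArg List.length hk
      simp only [List.length_drop, List.length_cons] at h2
      omega
    have hlen' : a.length - (k + 1) = as.length := by omega
    rw [hlen]
    have hv : min (min (pvED a b (k + 1) i + 1) (pvED a b k (i + 1) + 1))
        (if x ≠ y then pvED a b k i + 1 else pvED a b k i) = pvED a b (k + 1) (i + 1) := by
      rw [pvED_succ_succ, hak, hy]
      by_cases hxy : x = y <;> simp [hxy, min_comm]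
    unfold pvRowSeg
    rw [List.range'_succ]
    simp only [List.map_cons, pvLevInnerA]
    rw [hv]
    congr 1
    simpa [pvRowSeg, hlen'] using ihx (k + 1) hdrop

lemma pvRowFull_cons {α : Type} [DecidableEq α] (a b : List α) (i : Nat) :
    pvRowFull a b i = pvED a b 0 i :: pvRowSeg a b i 1 a.length := by
  unfold pvRowFull pvRowSeg
  rw [List.range_eq_range', List.range'_succ]
  simp

lemma pvRowsA_spec {α : Type} [DecidableEq α] (a b : List α) :
    ∀ (bs : List α) (i : Nat), i ≤ b.length → b.drop i = bs →
      pvLevRowsA a bs ((i : Int) + 1) (pvRowFull a b i) = pvRowFull a b b.length := by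
  intro bs
  induction bs with
  | nil =>
    intro i hi hdrop
    have : i = b.length := by
      have := List.drop_eq_nil_iff.mp hdrop
      omega
    subst this
    simp [pvLevRowsA]
  | cons y bs ihb =>
    intro i hi hdrop
    have hbi : b[i]? = some y := by
      have h0 : (b.drop i)[0]? = some y := by rw [hdrop]; rfl
      simpa [List.getElem?_drop] using h0
    have hdrop' : b.drop (i + 1) = bs := by
      have h1 := congrArg (List.drop 1) hdrop
      rw [List.drop_drop] at h1
      simpa using h1
    have hi' : i + 1 ≤ b.length := by
      have h2 := congrArg List.length hdrop
      simp only [List.length_drop, List.length_cons] at h2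
      omega
    rw [pvRowFull_cons]
    simp only [pvLevRowsA]
    have hleft : ((i : Int) + 1) = pvED a b 0 (i + 1) := by
      rw [pvED_zero_left]
      push_cast
      ring
    have hinner := pvInnerA_spec a b y i hbi a 0 (by simp)
    simp only [Nat.zero_add, Nat.sub_zero] at hinner
    rw [← hleft] at hinner
    rw [hinner]
    have hrow : ((i : Int) + 1) :: pvRowSeg a b (i + 1) 1 a.length = pvRowFull a b (i + 1) := by
      rw [pvRowFull_cons, pvED_zero_left]
      push_cast
      rfl
    rw [hrow]
    have hrec := ihb (i + 1) hi' hdrop'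
    push_cast at hrec
    exact hrec

lemma pvLevRun_eq {α : Type} [DecidableEq α] (a b : List α) :
    (pvLevRowsA a b 1 ((List.range (a.length + 1)).map Int.ofNat)).getD a.length 0
      = pvED a b a.length b.length := by
  have h0 : (List.range (a.length + 1)).map Int.ofNat = pvRowFull a b 0 := by
    unfold pvRowFull
    refine List.map_congr_left (fun j hj => ?_)
    rw [pvED_zero_right]
    rfl
  have h1 := pvRowsA_spec a b b 0 (Nat.zero_le _) (by simp)
  norm_num at h1
  rw [h0, h1]
  unfold pvRowFull
  simp [List.getD_eq_getElem?_getD]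

lemma pvLevenshteinA_eq {α : Type} [DecidableEq α] (a b : List α) :
    pvLevenshteinA a b = pvED a b a.length b.length := by
  unfold pvLevenshteinA
  by_cases h : a.length > b.length
  · simp only [h, if_true]
    rw [pvLevRun_eq b a, pvED_symm]
  · simp only [h, if_false]
    exact pvLevRun_eq a b

lemma pvLev_AB {α : Type} [DecidableEq α] (a b : List α) :
    pvLevenshteinA a b = pvLevenshteinB a b := by
  rw [pvLevenshteinA_eq, pvLevenshteinB_eq]

-- ---- plumbing ----
lemma pvFold_quad (l : List (String × String)) :
    ∀ (c0 l0 w0 k0 : Int),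
      l.foldl
        (fun acc pt =>
          let cw := pvCerA pt.1 pt.2
          let ww := pvWerA pt.1 pt.2
          (acc.1 + cw.1, acc.2.1 + cw.2, acc.2.2.1 + ww.1, acc.2.2.2 + ww.2))
        (c0, l0, w0, k0)
      = (c0 + (l.map (fun pt => (pvCerA pt.1 pt.2).1)).sum,
         l0 + (l.map (fun pt => (pvCerA pt.1 pt.2).2)).sum,
         w0 + (l.map (fun pt => (pvWerA pt.1 pt.2).1)).sum,
         k0 + (l.map (fun pt => (pvWerA pt.1 pt.2).2)).sum) := by
  induction l with
  | nil => intro c0 l0 w0 k0; simp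
  | cons pt l ih =>
    intro c0 l0 w0 k0
    simp only [List.foldl_cons, List.map_cons, List.sum_cons, ih]
    ring_nf

-- ===== VERDICT (by name: the statement is the Claim_ definition above) =====
theorem cer_wer_spec : Claim_equal_cer_wer := by
  intro preds targets _
  unfold Spec_cer_wer cer_wer cer_wer_alt
  rw [pvFold_quad]
  simp [pvCerA, pvWerA, pvLev_AB]
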